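-- pv_equiv track=rewrite | github.com/stliam42/algorithms | sirius_algorithms/liniar.py | rob_the_bank
-- ===== SOURCE A (Python) =====
-- def rob_the_bank(n: int, k: int, a: tuple) -> tuple:
--     """
--     Клиппи и Мерлин грабят банк.
--
--     Клиппи и Мерлин решили грабить банк, который представляет собой N
--     расположенных в ряд банковских ячеек, пронумерованных последовательно
--     числами от 1 до N.
--
--     С помощью своего друга Ровера, который работал в банке сторожевым
--     псом, они добыли ключи от всех ячеек, а также узнали, как много
--     ценностей хранится в каждой ячейке.
--
--     Чтобы не вызывать лишних подозрений, Клиппи и Мерлин решили ограбить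
--     всего две ячейки — по одной на каждого. Также, чтобы охрана банка
--     не почуяла неладного, они решили работать далеко друг от друга —
--     между ними должно быть не меньше K банковских ячеек.
--
--     Входные данные:
--     В первой строке вводятся два числа — N ( 2 ≤N≤ 105) и K (0 ≤K<N− 1)
--     соответственно. В второй строке вводятся N чисел ai(0 ≤ai≤ 109) —
--     стоимости хранимых ценностей в ячейках от 1 до N соответственно.
--
--     Выходные данные:
--     Выведите два числа в возрастающем порядке — номера ячеек, которые
--     нужно ограбить, чтобы суммарно украсть как можно более дорогие ценности,
--     не вызвав при этом лишних подозрений. Если вариантов несколько, выберите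
--     тот, в котором меньший номер вскрываемой ячейки был бы как можно ближе
--     к единице, чтобы в экстренном случае покинуть банк как можно скорее.
--     Если и таких вариантов несколько, выберите тот, в котором и больший номер
--     вскрываемой ячейки был бы как можно меньше.
-- """
--     ibest = 0
--     jbest = k + 1
--     imax = 0
--     for j in range(k + 2, n):
--         if a[j-(k+1)] > a[imax]:
--             imax = j - (k + 1)
--         if a[j] + a[imax] > a[jbest] + a[ibest]:
--             ibest = imax
--             jbest = j
--
--     return (ibest, jbest)
-- ===== SOURCE B (Python) =====
-- def rob_the_bank(n: int, k: int, a: tuple) -> tuple: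
--     ibest, jbest = 0, k + 1
--     for j in range(k + 2, n):
--         # earliest index of the maximal value among cells 0 .. j-k-1,
--         # recomputed from scratch (max returns the first maximum)
--         imax = max(range(j - k), key=lambda i: a[i])
--         if a[j] + a[imax] > a[jbest] + a[ibest]:
--             ibest, jbest = imax, j
--     return (ibest, jbest)
-- ===== Notes on version B (the rewrite author's own statement) =====
-- stated objective: simpler
-- what changed: B drops A's incrementally maintained running prefix-argmax state and instead recomputes, for each candidate j, the earliest argmax of the prefix a[0..j-k-1] from scratch with Python's max over an index range (nested rescans instead of a single pass with carried state).
import Mathlib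
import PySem

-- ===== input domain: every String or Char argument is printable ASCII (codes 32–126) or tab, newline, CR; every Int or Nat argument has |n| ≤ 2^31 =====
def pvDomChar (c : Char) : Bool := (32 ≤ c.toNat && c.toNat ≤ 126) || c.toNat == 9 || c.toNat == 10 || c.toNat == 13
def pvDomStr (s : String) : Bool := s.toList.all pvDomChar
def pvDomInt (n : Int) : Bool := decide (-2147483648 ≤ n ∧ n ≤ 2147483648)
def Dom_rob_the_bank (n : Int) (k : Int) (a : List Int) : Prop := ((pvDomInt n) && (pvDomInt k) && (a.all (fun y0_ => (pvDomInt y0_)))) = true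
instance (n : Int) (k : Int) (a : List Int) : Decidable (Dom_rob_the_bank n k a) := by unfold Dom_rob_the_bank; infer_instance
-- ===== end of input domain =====

-- B replaces A's incrementally maintained running prefix-argmax with a per-j rescan of the
-- prefix (Python's max over a range of indices): plainer nested-loop structure, same results.

-- a[i] under Pre_ every evaluated index satisfies Raise.InRange, so the default 0 is never returned
def pvGet (a : List Int) (i : Int) : Int := PySem.List.pyGetD a i 0

-- ===== PORT A =====
def stepA (k : Int) (a : List Int) (st : Int × Int × Int) (j : Int) : Int × Int × Int :=
  let imax := if pvGet a (j - (k + 1)) > pvGet a st.2.2 then j - (k + 1) else st.2.2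
  if pvGet a j + pvGet a imax > pvGet a st.2.1 + pvGet a st.1 then (imax, j, imax)
  else (st.1, st.2.1, imax)

def rob_the_bank (n : Int) (k : Int) (a : List Int) : Int × Int :=
  let st := (PySem.List.pyRange (k + 2) n 1).foldl (stepA k a) (0, k + 1, 0)
  (st.1, st.2.1)

-- ===== PORT B =====
-- Python's max(range, key=...): first index attaining the maximal key.
-- The [] case is unreachable in rob_the_bank_alt: the ranges passed are nonempty (j ≥ k+2 so j-k ≥ 2).
def pyMaxIdx (a : List Int) (l : List Int) : Int :=
  match l with
  | [] => 0
  | i0 :: rest => rest.foldl (fun b i => if pvGet a i > pvGet a b then i else b) i0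

def stepB (k : Int) (a : List Int) (st : Int × Int) (j : Int) : Int × Int :=
  let imax := pyMaxIdx a (PySem.List.pyRange 0 (j - k) 1)
  if pvGet a j + pvGet a imax > pvGet a st.2 + pvGet a st.1 then (imax, j) else st

def rob_the_bank_alt (n : Int) (k : Int) (a : List Int) : Int × Int :=
  (PySem.List.pyRange (k + 2) n 1).foldl (stepB k a) (0, k + 1)

-- ===== PRECONDITION & SPEC =====
-- Pre_ excludes exactly the inputs on which the Python A raises IndexError (when the loop
-- runs, some accessed index falls outside [-len(a), len(a)) ); wherever A returns, Pre_ holds.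
def Pre_rob_the_bank (n : Int) (k : Int) (a : List Int) : Prop :=
  k + 2 < n → (-(a.length : Int) ≤ k + 1 ∧ k + 1 < (a.length : Int) ∧ n ≤ (a.length : Int) ∧ n - k - 2 < (a.length : Int))
instance (n : Int) (k : Int) (a : List Int) : Decidable (Pre_rob_the_bank n k a) := by unfold Pre_rob_the_bank; infer_instance
def pvWitness_rob_the_bank : Int × Int × List Int := (4, 0, [3, 1, 2, 5])

def Spec_rob_the_bank (n : Int) (k : Int) (a : List Int) (out : Int × Int) : Prop := out = rob_the_bank_alt n k a
instance (n : Int) (k : Int) (a : List Int) (out : Int × Int) : Decidable (Spec_rob_the_bank n k a out) := by unfold Spec_rob_the_bank; infer_instance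

-- ===== CLAIM (what is proved, stated in full; the proofs are below) =====
def Claim_equal_rob_the_bank : Prop := ∀ (n : Int) (k : Int) (a : List Int), Dom_rob_the_bank n k a → Pre_rob_the_bank n k a → Spec_rob_the_bank n k a (rob_the_bank n k a)

-- ===== LEMMAS AND PROOFS =====

-- A's running imax entering iteration s equals B's rescanned argmax of the prefix 0 .. s-(k+1)-1
def Mfun (k : Int) (a : List Int) (s : Int) : Int :=
  pyMaxIdx a (PySem.List.pyRange 0 (s - (k + 1)) 1)

theorem pyMaxIdx_snoc (a : List Int) (xs : List Int) (y : Int) (h : xs ≠ []) :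
    pyMaxIdx a (xs ++ [y]) = if pvGet a y > pvGet a (pyMaxIdx a xs) then y else pyMaxIdx a xs := by
  cases xs with
  | nil => exact absurd rfl h
  | cons i0 rest => simp [pyMaxIdx, List.foldl_append]

theorem Mfun_step (k : Int) (a : List Int) (s : Int) (h : k + 2 ≤ s) :
    Mfun k a (s + 1) = if pvGet a (s - (k + 1)) > pvGet a (Mfun k a s) then s - (k + 1) else Mfun k a s := by
  unfold Mfun
  have h1 : s + 1 - (k + 1) = (s - (k + 1)) + 1 := by ring
  rw [h1, PySem.List.pyRange_one_succ_right (by omega)]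
  refine pyMaxIdx_snoc a _ _ ?_
  rw [PySem.List.pyRange_one_cons (by omega)]
  exact List.cons_ne_nil _ _

theorem loop_eq (n k : Int) (a : List Int) : ∀ (c : Nat) (s ib jb : Int),
    (n - s).toNat = c → k + 2 ≤ s →
    (((PySem.List.pyRange s n 1).foldl (stepA k a) (ib, jb, Mfun k a s)).1,
     ((PySem.List.pyRange s n 1).foldl (stepA k a) (ib, jb, Mfun k a s)).2.1)
      = (PySem.List.pyRange s n 1).foldl (stepB k a) (ib, jb) := by
  intro c
  induction c with
  | zero =>
    intro s ib jb hc _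
    rw [PySem.List.pyRange_one_eq_nil (by omega)]
    simp
  | succ c ih =>
    intro s ib jb hc hs
    have hsn : s < n := by omega
    rw [PySem.List.pyRange_one_cons hsn]
    simp only [List.foldl_cons]
    have hM : pyMaxIdx a (PySem.List.pyRange 0 (s - k) 1) = Mfun k a (s + 1) := by
      unfold Mfun; congr 1; congr 1; ring
    have hA : stepA k a (ib, jb, Mfun k a s) s
        = (if pvGet a s + pvGet a (Mfun k a (s + 1)) > pvGet a jb + pvGet a ib
            then (Mfun k a (s + 1), s, Mfun k a (s + 1)) else (ib, jb, Mfun k a (s + 1))) := by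
      simp only [stepA, ← Mfun_step k a s hs]
    have hB : stepB k a (ib, jb) s
        = (if pvGet a s + pvGet a (Mfun k a (s + 1)) > pvGet a jb + pvGet a ib
            then (Mfun k a (s + 1), s) else (ib, jb)) := by
      simp only [stepB, hM]
    rw [hA, hB]
    split
    · exact ih (s + 1) (Mfun k a (s + 1)) s (by omega) (by omega)
    · exact ih (s + 1) ib jb (by omega) (by omega)

theorem Mfun_init (k : Int) (a : List Int) : Mfun k a (k + 2) = 0 := by
  unfold Mfun
  have h1 : k + 2 - (k + 1) = (0 : Int) + 1 := by ring
  rw [h1, PySem.List.pyRange_one_singleton]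
  rfl

-- ===== VERDICT (by name: the statement is the Claim_ definition above) =====
theorem rob_the_bank_spec : Claim_equal_rob_the_bank := by
  intro n k a _ _
  unfold Spec_rob_the_bank rob_the_bank rob_the_bank_alt
  have h0 : ((0 : Int), k + 1, (0 : Int)) = ((0 : Int), k + 1, Mfun k a (k + 2)) := by
    rw [Mfun_init]
  rw [h0]
  exact loop_eq n k a (n - (k + 2)).toNat (k + 2) 0 (k + 1) rfl le_rfl
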